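-- pv_equiv track=rewrite | github.com/gcount85/algorithms-practice | 99. book_codingtestpython/47-draft2.py | solution
-- ===== SOURCE A (Python) =====
-- def solution(N):
--
--     answer = []
--
--     def dfs(N, num, total, selected_nums):
--         for i in range(num, N + 1):
--             selected_nums.append(i)
--             new_total = total + i
--             if new_total == 10:
--                 answer.append(selected_nums[:])
--                 selected_nums.pop()
--                 continue
--             if new_total > 10:
--                 selected_nums.pop()
--                 continue
--             dfs(N, i + 1, new_total, selected_nums)
--             selected_nums.pop()
--
--     dfs(N, 1, 0, [])
--     return answer
-- ===== SOURCE B (Python) =====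
-- def solution(N):
--     # Elements larger than 10 can never occur in a subset summing to 10,
--     # so enumerate subsets of 1..min(N, 10) by bitmask and keep those summing to 10.
--     if N < 1:
--         return []
--     M = min(N, 10)
--     res = []
--     for mask in range(1, 1 << M):
--         subset = [i for i in range(1, M + 1) if mask >> (i - 1) & 1]
--         if sum(subset) == 10:
--             res.append(subset)
--     res.sort()
--     return res
-- ===== Notes on version B (the rewrite author's own statement) =====
-- stated objective: faster
-- what changed: Replaces the pruned recursive DFS over range(num, N+1) (which scans all N loop indices at the top level) by a flat bitmask enumeration of the subsets of 1..min(N,10) filtered by sum == 10 and sorted lexicographically; since no element above 10 can occur in a subset summing to 10, B's work is a constant independent of N.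
import Mathlib
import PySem

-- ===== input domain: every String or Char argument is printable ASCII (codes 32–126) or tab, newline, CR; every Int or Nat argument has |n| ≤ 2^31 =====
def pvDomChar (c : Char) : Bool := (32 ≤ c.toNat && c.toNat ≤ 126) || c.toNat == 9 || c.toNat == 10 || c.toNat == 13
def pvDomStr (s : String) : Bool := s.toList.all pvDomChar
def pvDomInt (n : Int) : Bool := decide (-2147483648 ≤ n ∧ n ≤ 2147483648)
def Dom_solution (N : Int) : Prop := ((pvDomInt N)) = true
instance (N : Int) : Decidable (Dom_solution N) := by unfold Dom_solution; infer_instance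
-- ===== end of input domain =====

-- B replaces A's pruned recursive DFS by a flat bitmask enumeration of subsets of
-- 1..min(N,10) filtered by sum == 10 and sorted lexicographically; B runs in O(1)
-- independent of N (faster, asymptotic).

-- ===== PORT A =====
-- A's `for i in range(num, N+1)` loop with the recursive dfs call inside is ported as
-- recursion on the loop index `num`; the Nat argument `gas` is only a termination fuel
-- bounding the remaining range length (N + 1 - num); it never changes the computed value
-- when large enough (solution supplies (N+1-1).toNat, exactly the full range length).
def dfsA (gas : Nat) (N num total : Int) (sel : List Int) (ans : List (List Int)) :
    List (List Int) :=
  match gas with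
  | 0 => ans
  | gas + 1 =>
    if num ≤ N then
      -- one iteration of the for-loop at i = num
      let sel' := sel ++ [num]            -- selected_nums.append(i)
      let t := total + num                -- new_total = total + i
      let ans' :=
        if t == 10 then ans ++ [sel']     -- answer.append(selected_nums[:]); pop; continue
        else if t > 10 then ans           -- pop; continue
        else dfsA gas N (num + 1) t sel' ans   -- dfs(N, i+1, new_total, selected_nums); pop
      dfsA gas N (num + 1) total sel ans' -- remaining iterations of the loop
    else ans

def solution (N : Int) : List (List Int) :=
  dfsA (N + 1 - 1).toNat N 1 0 [] []

-- ===== PORT B =====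
def solution_alt (N : Int) : List (List Int) :=
  if N < 1 then []
  else
    let M := min N 10
    let res := (List.range (2 ^ M.toNat)).drop 1 |>.foldl
      (fun res mask =>
        let subset := (PySem.List.pyRange 1 (M + 1) 1).filter
          (fun i => (mask >>> (i - 1).toNat) % 2 == 1)
        if subset.sum == 10 then res ++ [subset] else res) []
    PySem.List.sorted res (fun x => x) false

-- ===== PRECONDITION & SPEC =====
def Spec_solution (N : Int) (out : List (List Int)) : Prop := out = solution_alt N
instance (N : Int) (out : List (List Int)) : Decidable (Spec_solution N out) := by unfold Spec_solution; infer_instance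

-- ===== CLAIM (what is proved, stated in full; the proofs are below) =====
def Claim_equal_solution : Prop := ∀ (N : Int), Dom_solution N → Spec_solution N (solution N)

-- ===== LEMMAS AND PROOFS =====

-- For N ≥ 10, every loop index i > 10 is pruned (total ≥ 0 so total + i > 10),
-- hence the DFS over 1..N equals the DFS over 1..10.
lemma dfsA_ge10 (gas : Nat) (N num total : Int) (sel : List Int) (ans : List (List Int))
    (hN : 10 ≤ N) (hnum : 1 ≤ num) (ht : 0 ≤ total)
    (hg : (N + 1 - num).toNat ≤ gas) :
    dfsA gas N num total sel ans = dfsA ((11 : Int) - num).toNat 10 num total sel ans := by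
  induction gas generalizing num total sel ans with
  | zero =>
    have hr : ((11 : Int) - num).toNat = 0 := by omega
    rw [hr]
    rfl
  | succ g ih =>
    by_cases hn : num ≤ N
    · by_cases h10 : num ≤ 10
      · -- both sides take one real loop step
        have hg10 : ((11 : Int) - num).toNat = ((11 : Int) - (num + 1)).toNat + 1 := by omega
        rw [hg10]
        simp only [dfsA, hn, if_true, h10, if_true]
        rw [ih (num + 1) total sel _ (by omega) ht (by omega)]
        by_cases he : (total + num == 10) = true
        · simp only [he, if_true]
        · simp only [he]
          by_cases hgt : total + num > 10
          · simp only [hgt, if_true]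
          · simp only [hgt, if_false]
            rw [ih (num + 1) (total + num) (sel ++ [num]) ans (by omega) (by omega) (by omega)]
      · -- 10 < num ≤ N: right side is done, left side prunes every remaining i
        have hr : ((11 : Int) - num).toNat = 0 := by omega
        rw [hr]
        simp only [dfsA, hn, if_true]
        have hgt : total + num > 10 := by omega
        have h1 : ¬ ((total + num) == 10) = true := by simp; omega
        rw [ih (num + 1) total sel _ (by omega) ht (by omega)]
        have hr2 : ((11 : Int) - (num + 1)).toNat = 0 := by omega
        rw [hr2]
        simp only [h1, hgt, if_true]
        rfl
    · have hr : ((11 : Int) - num).toNat = 0 := by omega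
      rw [hr]
      simp [dfsA, hn]

lemma solution_alt_ge10 (N : Int) (hN : 10 ≤ N) : solution_alt N = solution_alt 10 := by
  have h1 : ¬ N < 1 := by omega
  have h2 : min N 10 = 10 := by omega
  simp [solution_alt, h1, h2]

lemma solution_ge10 (N : Int) (hN : 10 ≤ N) : solution N = solution 10 := by
  unfold solution
  rw [dfsA_ge10 (N + 1 - 1).toNat N 1 0 [] [] hN (by omega) (by omega) (by omega)]
  norm_num

lemma solution_le0 (N : Int) (hN : N < 1) : solution N = [] := by
  unfold solution
  have hn : ¬ (1 : Int) ≤ N := by omega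
  rcases (show (N + 1 - 1).toNat = 0 ∨ (N + 1 - 1).toNat = 1 by omega) with h | h <;>
    rw [h] <;> simp [dfsA, hn]

set_option maxRecDepth 40000 in
lemma solution_eq_alt_10 : solution 10 = solution_alt 10 := by decide

-- ===== VERDICT (by name: the statement is the Claim_ definition above) =====
set_option maxRecDepth 40000 in
theorem solution_spec : Claim_equal_solution := by
  intro N _
  unfold Spec_solution
  by_cases h1 : N < 1
  · rw [solution_le0 N h1]
    simp [solution_alt, h1]
  · by_cases h2 : 10 ≤ N
    · rw [solution_ge10 N h2, solution_alt_ge10 N h2]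
      exact solution_eq_alt_10
    · interval_cases N <;> decide
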